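-- pv_equiv track=rewrite | github.com/mabruzzo/cholla-vis | src/cholla_vis/log_parse.py | _get_sn_detail_chunks
-- ===== SOURCE A (Python) =====
-- from collections.abc import Callable, Iterator, Sequence
--
-- def _get_sn_detail_chunks(lines: Sequence[str]) -> list[str]:
--     # this is crude! (and I would love to parse all of the contained information!)
--     chunk_l = []
--
--     i = 0
--     while i < len(lines):
--         if lines[i].startswith('...(block='):
--             cur_chunk = [lines[i]]
--             while (i+1)<len(lines) and lines[i+1].startswith('    '):
--                 cur_chunk.append(lines[i+1])
--                 i+=1
--             chunk_l.append(cur_chunk)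
--         i+=1
--     return chunk_l
-- ===== SOURCE B (Python) =====
-- def _get_sn_detail_chunks(lines):
--     chunks = []
--     current = None
--     for line in lines:
--         if line.startswith('...(block='):
--             current = [line]
--             chunks.append(current)
--         elif current is not None and line.startswith('    '):
--             current.append(line)
--         else:
--             current = None
--     return chunks
-- ===== Notes on version B (the rewrite author's own statement) =====
-- stated objective: idiomatic
-- what changed: Replaced the index-based nested while loops (inner loop manually consuming indented lines and advancing i) with a single for-loop state machine that keeps a reference to the currently open chunk and resets it on any other line.
import Mathlib
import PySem

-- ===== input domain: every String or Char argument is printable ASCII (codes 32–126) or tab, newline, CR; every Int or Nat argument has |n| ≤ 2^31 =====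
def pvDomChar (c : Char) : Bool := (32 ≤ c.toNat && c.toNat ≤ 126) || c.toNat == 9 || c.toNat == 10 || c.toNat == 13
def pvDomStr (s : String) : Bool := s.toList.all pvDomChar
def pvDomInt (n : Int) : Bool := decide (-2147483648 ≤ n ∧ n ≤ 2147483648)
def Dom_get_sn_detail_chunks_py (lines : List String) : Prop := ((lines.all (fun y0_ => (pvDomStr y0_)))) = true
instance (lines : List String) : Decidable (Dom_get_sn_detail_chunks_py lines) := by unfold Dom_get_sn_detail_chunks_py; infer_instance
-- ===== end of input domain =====

-- B replaces A's index-based nested while loops by a single for-loop state machine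
-- keeping the currently open chunk (objective: idiomatic); return values proved equal.

-- ===== PORT A =====
-- inner `while (i+1)<len(lines) and lines[i+1].startswith('    ')` loop; `fuel` only
-- makes the index loop structurally total (fuel ≥ len(lines)-i never runs out).
-- returns (consumed indented lines, final i)
def pyConsume (lines : List String) : Nat → Nat → List String × Nat
  | 0, i => ([], i)
  | g+1, i =>
    if i + 1 < lines.length ∧ PySem.Str.startswith lines[i+1]! "    " = true then
      let r := pyConsume lines g (i+1)
      (lines[i+1]! :: r.1, r.2)
    else ([], i)

-- outer `while i < len(lines)` loop (same fuel scheme)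
def pyOuter (lines : List String) : Nat → Nat → List (List String)
  | 0, _ => []
  | f+1, i =>
    if i < lines.length then
      if PySem.Str.startswith lines[i]! "...(block=" then
        let r := pyConsume lines (lines.length - i) i
        (lines[i]! :: r.1) :: pyOuter lines f (r.2 + 1)
      else pyOuter lines f (i+1)
    else []

def get_sn_detail_chunks_py (lines : List String) : List (List String) :=
  pyOuter lines lines.length 0

-- ===== PORT B =====
-- single pass with state (finished chunks, currently open chunk); the open chunk
-- (Python: a list already referenced from `chunks` and mutated in place) is flushed
-- to `done` when it is closed (a header line, a non-indented line, or end of input).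
def altGo : List String → List (List String) → Option (List String) → List (List String)
  | [], done, none => done
  | [], done, some c => done ++ [c]
  | l :: rest, done, cur =>
    if PySem.Str.startswith l "...(block=" then
      altGo rest (match cur with | none => done | some c => done ++ [c]) (some [l])
    else
      match cur with
      | some c =>
        if PySem.Str.startswith l "    " then altGo rest done (some (c ++ [l]))
        else altGo rest (done ++ [c]) none
      | none => altGo rest done none

def get_sn_detail_chunks_py_alt (lines : List String) : List (List String) :=
  altGo lines [] none

-- ===== PRECONDITION & SPEC =====
def Spec_get_sn_detail_chunks_py (lines : List String) (out : List (List String)) : Prop := out = get_sn_detail_chunks_py_alt lines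
instance (lines : List String) (out : List (List String)) : Decidable (Spec_get_sn_detail_chunks_py lines out) := by unfold Spec_get_sn_detail_chunks_py; infer_instance

-- ===== CLAIM (what is proved, stated in full; the proofs are below) =====
def Claim_equal_get_sn_detail_chunks_py : Prop := ∀ (lines : List String), Dom_get_sn_detail_chunks_py lines → Spec_get_sn_detail_chunks_py lines (get_sn_detail_chunks_py lines)

-- ===== LEMMAS AND PROOFS =====

-- an indented line is never a header line (their first characters differ)
theorem not_header_of_indent (l : String)
    (h : PySem.Str.startswith l "    " = true) :
    PySem.Str.startswith l "...(block=" = false := by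
  simp only [PySem.Str.startswith_eq] at *
  rw [PySem.Chars.startswith_iff] at h
  by_contra hc
  rw [Bool.not_eq_false, PySem.Chars.startswith_iff] at hc
  obtain ⟨t1, ht1⟩ := h
  obtain ⟨t2, ht2⟩ := hc
  rw [show ("    ".toList) = [' ',' ',' ',' '] from rfl] at ht1
  rw [show ("...(block=".toList) = ['.','.','.','(','b','l','o','c','k','='] from rfl] at ht2
  cases hl : l.toList with
  | nil => rw [hl] at ht1; simp at ht1
  | cons a as =>
    rw [hl] at ht1 ht2
    injection ht1 with h1 _
    injection ht2 with h2 _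
    rw [← h1] at h2
    exact absurd h2 (by decide)

-- with the index past the end, the outer loop returns [] whatever the fuel
theorem pyOuter_past (lines : List String) (f i : Nat) (h : lines.length ≤ i) :
    pyOuter lines f i = [] := by
  cases f with
  | zero => rfl
  | succ f => rw [pyOuter, if_neg (by omega)]

-- with its guard false, the inner loop stops at i whatever the fuel
theorem pyConsume_stop (lines : List String) (g i : Nat)
    (h : ¬ (i + 1 < lines.length ∧ PySem.Str.startswith lines[i+1]! "    " = true)) :
    pyConsume lines g i = ([], i) := by
  cases g with
  | zero => rfl
  | succ g => rw [pyConsume, if_neg h]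

-- joint invariant: the state machine with no open chunk tracks pyOuter, and with an
-- open chunk c right after position i it tracks pyConsume from i then pyOuter
-- (for every sufficient amount of fuel).
theorem altGo_eq (lines : List String) :
    ∀ n i,
      (lines.length - i < n →
        ∀ f done, lines.length - i ≤ f →
          altGo (lines.drop i) done none = done ++ pyOuter lines f i) ∧
      (lines.length - i ≤ n →
        ∀ g f done c, i < lines.length → lines.length - i ≤ g + 1 → lines.length - i ≤ f + 1 →
          altGo (lines.drop (i+1)) done (some c)
            = done ++ (c ++ (pyConsume lines g i).1) :: pyOuter lines f ((pyConsume lines g i).2 + 1)) := by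
  intro n
  induction n with
  | zero =>
    intro i
    exact ⟨fun hm => by omega, fun hH g f done c hlt _ _ => by omega⟩
  | succ n ih =>
    intro i
    constructor
    · -- M(i): no open chunk
      intro hm f done hf
      by_cases hlt : i < lines.length
      case neg =>
        have hlen : lines.length ≤ i := by omega
        rw [List.drop_of_length_le hlen, pyOuter_past lines f i hlen]
        simp [altGo]
      case pos =>
        have hdrop : lines.drop i = lines[i]! :: lines.drop (i+1) := by
          rw [List.drop_eq_getElem_cons hlt, getElem!_pos lines i hlt]
        obtain ⟨f', rfl⟩ : ∃ f', f = f' + 1 := ⟨f - 1, by omega⟩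
        rw [hdrop, altGo, pyOuter, if_pos hlt]
        by_cases hh : PySem.Str.startswith lines[i]! "...(block=" = true
        · rw [if_pos hh, if_pos hh]
          have H := (ih i).2 (by omega) (lines.length - i) f' done [lines[i]!] hlt
            (by omega) (by omega)
          rw [H]; simp
        · rw [if_neg hh, if_neg hh]
          exact (ih (i+1)).1 (by omega) f' done (by omega)
    · -- H(i): open chunk c, next position i+1
      intro hH g f done c hlt hg hf
      by_cases hnext : i + 1 < lines.length ∧ PySem.Str.startswith lines[i+1]! "    " = true
      · -- the inner while consumes lines[i+1]
        obtain ⟨hn1, hn2⟩ := hnext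
        obtain ⟨g', rfl⟩ : ∃ g', g = g' + 1 := ⟨g - 1, by omega⟩
        have hdrop1 : lines.drop (i+1) = lines[i+1]! :: lines.drop (i+2) := by
          rw [List.drop_eq_getElem_cons hn1, getElem!_pos lines (i+1) hn1]
        have hnh := not_header_of_indent _ hn2
        rw [pyConsume, if_pos ⟨hn1, hn2⟩, hdrop1, altGo,
          if_neg (by rw [hnh]; exact Bool.false_ne_true), if_pos hn2]
        have H := (ih (i+1)).2 (by omega) g' f done (c ++ [lines[i+1]!]) hn1
          (by omega) (by omega)
        rw [H]; simp
      · -- the inner while stops at i: chunk c is complete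
        rw [pyConsume_stop lines g i hnext]
        by_cases hn1 : i + 1 < lines.length
        case neg =>
          have hlen1 : lines.length ≤ i + 1 := by omega
          rw [List.drop_of_length_le hlen1, pyOuter_past lines f (i+1) hlen1]
          simp [altGo]
        case pos =>
          have hn2 : ¬ PySem.Str.startswith lines[i+1]! "    " = true := fun h => hnext ⟨hn1, h⟩
          have hdrop1 : lines.drop (i+1) = lines[i+1]! :: lines.drop (i+2) := by
            rw [List.drop_eq_getElem_cons hn1, getElem!_pos lines (i+1) hn1]
          obtain ⟨f', rfl⟩ : ∃ f', f = f' + 1 := ⟨f - 1, by omega⟩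
          rw [hdrop1, altGo]
          conv_rhs => rw [pyOuter, if_pos hn1]
          by_cases hh : PySem.Str.startswith lines[i+1]! "...(block=" = true
          · rw [if_pos hh, if_pos hh]
            have H := (ih (i+1)).2 (by omega) (lines.length - (i+1)) f' (done ++ [c])
              [lines[i+1]!] hn1 (by omega) (by omega)
            rw [H]; simp
          · rw [if_neg hh, if_neg hh, if_neg hn2]
            have M := (ih (i+2)).1 (by omega) f' (done ++ [c]) (by omega)
            rw [M]; simp

theorem get_sn_detail_chunks_py_eq (lines : List String) :
    get_sn_detail_chunks_py lines = get_sn_detail_chunks_py_alt lines := by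
  have := (altGo_eq lines (lines.length + 1) 0).1 (by omega) lines.length [] (by omega)
  unfold get_sn_detail_chunks_py get_sn_detail_chunks_py_alt
  simpa using this.symm

-- ===== VERDICT (by name: the statement is the Claim_ definition above) =====
theorem get_sn_detail_chunks_py_spec : Claim_equal_get_sn_detail_chunks_py := by
  intro lines _
  unfold Spec_get_sn_detail_chunks_py
  exact get_sn_detail_chunks_py_eq lines
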